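-- pv_equiv track=rewrite | github.com/Nobres-gui/Projetos_CursoAlura | Python/Inteligencia Artificial/Chamada_LLM/correcao.py | contador_e_juntador
-- ===== SOURCE A (Python) =====
-- def contador_e_juntador(lista_de_dicionarios):
--     contador_positivas = 0
--     contador_negativas = 0
--     contador_neutras = 0
--
--     for dicionario in lista_de_dicionarios:
--         if dicionario['avaliacao'] == 'Positiva':
--             contador_positivas += 1
--         elif dicionario['avaliacao'] == 'Negativa':
--             contador_negativas += 1
--         else:
--             contador_neutras += 1
--
--     lista_de_dicionarios_str = [str(dicionario) for dicionario in lista_de_dicionarios]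
--     textos_unidos = "#####".join(lista_de_dicionarios_str)
--
--     return contador_positivas, contador_negativas, contador_neutras, textos_unidos
-- ===== SOURCE B (Python) =====
-- def contador_e_juntador(lista_de_dicionarios):
--     avaliacoes = [dicionario['avaliacao'] for dicionario in lista_de_dicionarios]
--     contador_positivas = avaliacoes.count('Positiva')
--     contador_negativas = avaliacoes.count('Negativa')
--     contador_neutras = len(lista_de_dicionarios) - contador_positivas - contador_negativas
--     textos_unidos = "#####".join(str(dicionario) for dicionario in lista_de_dicionarios)
--     return contador_positivas, contador_negativas, contador_neutras, textos_unidos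
-- ===== Notes on version B (the rewrite author's own statement) =====
-- stated objective: simpler
-- what changed: Replaces the three-way if/elif/else counter loop with a list of the 'avaliacao' values counted twice via list.count, deriving neutras by subtraction from the length instead of an explicit else branch; the join is unchanged.
import Mathlib
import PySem

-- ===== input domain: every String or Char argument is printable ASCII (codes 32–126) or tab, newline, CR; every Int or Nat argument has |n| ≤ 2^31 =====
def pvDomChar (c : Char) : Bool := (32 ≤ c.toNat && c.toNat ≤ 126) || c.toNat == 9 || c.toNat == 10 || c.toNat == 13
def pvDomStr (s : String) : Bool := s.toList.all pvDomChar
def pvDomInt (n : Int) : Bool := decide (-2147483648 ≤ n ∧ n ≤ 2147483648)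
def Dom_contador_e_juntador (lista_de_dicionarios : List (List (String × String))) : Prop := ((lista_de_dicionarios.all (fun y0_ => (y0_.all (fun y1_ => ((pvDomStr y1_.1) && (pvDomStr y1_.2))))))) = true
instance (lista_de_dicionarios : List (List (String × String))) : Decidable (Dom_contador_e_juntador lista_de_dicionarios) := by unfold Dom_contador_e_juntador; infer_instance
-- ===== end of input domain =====

-- B replaces A's three-way if/elif/else counter loop by counting the 'avaliacao' values with
-- list.count and deriving the neutral count by subtraction; the join is unchanged (objective: simpler).

-- ===== PORT A =====
-- Python's repr of a str (exact for the ASCII domain: printable ASCII plus tab/newline/CR):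
-- single quotes unless the string contains ' and no "; escapes backslash, the quote char, \t \n \r.
def pyReprStr (s : String) : String :=
  let cs := s.toList
  let q : Char := if cs.contains '\'' && !cs.contains '"' then '"' else '\''
  let body := cs.flatMap (fun c =>
    if c = '\\' then ['\\', '\\']
    else if c = q then ['\\', q]
    else if c = '\t' then ['\\', 't']
    else if c = '\n' then ['\\', 'n']
    else if c = '\r' then ['\\', 'r']
    else [c])
  String.ofList (q :: body ++ [q])

-- str(dicionario) for a dict of strings: "{'k': 'v', …}" (both Pythons call this same builtin)
def pyReprDict (d : List (String × String)) : String :=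
  "{" ++ PySem.Str.join ", " (d.map (fun kv => pyReprStr kv.1 ++ ": " ++ pyReprStr kv.2)) ++ "}"

-- dicionario['avaliacao'] (KeyError = none; Pre_ excludes that)
def pvAval (d : List (String × String)) : Option String := (PySem.Dict.mk d).get? "avaliacao"

def contador_e_juntador (lista_de_dicionarios : List (List (String × String))) : Int × Int × Int × String :=
  let c : Int × Int × Int := lista_de_dicionarios.foldl (fun acc dicionario =>
    if (pvAval dicionario).getD "" = "Positiva" then (acc.1 + 1, acc.2.1, acc.2.2)
    else if (pvAval dicionario).getD "" = "Negativa" then (acc.1, acc.2.1 + 1, acc.2.2)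
    else (acc.1, acc.2.1, acc.2.2 + 1)) (0, 0, 0)
  (c.1, c.2.1, c.2.2, PySem.Str.join "#####" (lista_de_dicionarios.map pyReprDict))

-- ===== PORT B =====
def contador_e_juntador_alt (lista_de_dicionarios : List (List (String × String))) : Int × Int × Int × String :=
  let avaliacoes := lista_de_dicionarios.map (fun dicionario => (pvAval dicionario).getD "")
  let contador_positivas : Int := (PySem.List.count avaliacoes "Positiva" : Int)
  let contador_negativas : Int := (PySem.List.count avaliacoes "Negativa" : Int)
  let contador_neutras : Int := (lista_de_dicionarios.length : Int) - contador_positivas - contador_negativas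
  (contador_positivas, contador_negativas, contador_neutras,
    PySem.Str.join "#####" (lista_de_dicionarios.map pyReprDict))

-- ===== PRECONDITION & SPEC =====
-- Pre_ excludes exactly the inputs where a dict lacks the key 'avaliacao': there Python A raises KeyError.
def Pre_contador_e_juntador (lista_de_dicionarios : List (List (String × String))) : Prop :=
  (lista_de_dicionarios.all (fun d => (PySem.Dict.mk d).contains "avaliacao")) = true
instance (lista_de_dicionarios : List (List (String × String))) : Decidable (Pre_contador_e_juntador lista_de_dicionarios) := by unfold Pre_contador_e_juntador; infer_instance
def pvWitness_contador_e_juntador : (List (List (String × String))) := [[("avaliacao", "Positiva")], [("avaliacao", "meh"), ("texto", "ok")]]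

def Spec_contador_e_juntador (lista_de_dicionarios : List (List (String × String))) (out : Int × Int × Int × String) : Prop := out = contador_e_juntador_alt lista_de_dicionarios
instance (lista_de_dicionarios : List (List (String × String))) (out : Int × Int × Int × String) : Decidable (Spec_contador_e_juntador lista_de_dicionarios out) := by unfold Spec_contador_e_juntador; infer_instance

-- ===== CLAIM (what is proved, stated in full; the proofs are below) =====
def Claim_equal_contador_e_juntador : Prop := ∀ (lista_de_dicionarios : List (List (String × String))), Dom_contador_e_juntador lista_de_dicionarios → Pre_contador_e_juntador lista_de_dicionarios → Spec_contador_e_juntador lista_de_dicionarios (contador_e_juntador lista_de_dicionarios)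

-- ===== LEMMAS AND PROOFS =====

-- A's counter fold, characterised: first two components count the labels, the third is the remainder.
theorem pv_fold_counts (l : List (List (String × String))) (p n z : Int) :
    l.foldl (fun acc dicionario =>
      if (pvAval dicionario).getD "" = "Positiva" then (acc.1 + 1, acc.2.1, acc.2.2)
      else if (pvAval dicionario).getD "" = "Negativa" then (acc.1, acc.2.1 + 1, acc.2.2)
      else (acc.1, acc.2.1, acc.2.2 + 1)) (p, n, z)
    = (p + ((l.map (fun d => (pvAval d).getD "")).count "Positiva" : Int),
       n + ((l.map (fun d => (pvAval d).getD "")).count "Negativa" : Int),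
       z + ((l.length : Int)
            - ((l.map (fun d => (pvAval d).getD "")).count "Positiva" : Int)
            - ((l.map (fun d => (pvAval d).getD "")).count "Negativa" : Int))) := by
  induction l generalizing p n z with
  | nil => simp
  | cons d t ih =>
    simp only [List.foldl_cons, List.map_cons, List.count_cons, List.length_cons]
    by_cases h1 : (pvAval d).getD "" = "Positiva"
    · simp [h1, ih] <;> omega
    · by_cases h2 : (pvAval d).getD "" = "Negativa"
      · simp [h1, h2, ih] <;> omega
      · simp [h1, h2, ih] <;> omega

-- ===== VERDICT (by name: the statement is the Claim_ definition above) =====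
theorem contador_e_juntador_spec : Claim_equal_contador_e_juntador := by
  intro l _ _
  show contador_e_juntador l = contador_e_juntador_alt l
  simp only [contador_e_juntador, contador_e_juntador_alt, PySem.List.count_eq, pv_fold_counts]
  norm_num
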